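-- pv_equiv track=rewrite | github.com/webster586/cardlens | src/pokemon_scanner/ui/catalog_dialog.py | _group_entries_by_year
-- ===== SOURCE A (Python) =====
-- from itertools import groupby
--
-- def _year_for_set(entries: list[dict]) -> str:
--     """Extract the release year string from a list of catalog/enriched entries."""
--     for e in entries:
--         rd = e.get("set_release_date") or ""
--         if rd and len(rd) >= 4 and rd[:4].isdigit():
--             return rd[:4]
--     for e in entries:
--         fa = e.get("fetched_at") or ""
--         if fa and len(fa) >= 4 and fa[:4].isdigit():
--             return fa[:4]
--     return "?"
--
-- def _group_entries_by_year(
--     entries: list[dict],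
-- ) -> dict[str, dict[str, list[dict]]]:
--     """Return {year: {set_name: [entries]}} preserving groupby order."""
--     result: dict[str, dict[str, list[dict]]] = {}
--     for set_name, g in groupby(entries, key=lambda e: e.get("set_name") or ""):
--         group = list(g)
--         year = _year_for_set(group)
--         result.setdefault(year, {})[set_name] = group
--     return result
-- ===== SOURCE B (Python) =====
-- def _year_for_set_once(group):
--     """Single pass: return first valid release year; remember first valid fetched_at year as fallback."""
--     fallback = None
--     for e in group:
--         rd = e.get("set_release_date") or ""
--         if len(rd) >= 4 and rd[:4].isdigit():
--             return rd[:4]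
--         if fallback is None:
--             fa = e.get("fetched_at") or ""
--             if len(fa) >= 4 and fa[:4].isdigit():
--                 fallback = fa[:4]
--     return fallback if fallback is not None else "?"
--
-- def _group_entries_by_year(entries):
--     result = {}
--
--     def flush(key, group):
--         result.setdefault(_year_for_set_once(group), {})[key] = group
--
--     cur_key, cur = None, []
--     for e in entries:
--         k = e.get("set_name") or ""
--         if cur and k == cur_key:
--             cur.append(e)
--         else:
--             if cur:
--                 flush(cur_key, cur)
--             cur_key, cur = k, [e]
--     if cur:
--         flush(cur_key, cur)
--     return result
-- ===== Notes on version B (the rewrite author's own statement) =====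
-- stated objective: alternative
-- what changed: Replaces itertools.groupby plus the two sequential scans of _year_for_set by one explicit run-accumulating loop over the entries and a single-pass year search that records the first valid fetched_at year in a fallback variable while looking for a release-date year.
import Mathlib
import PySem

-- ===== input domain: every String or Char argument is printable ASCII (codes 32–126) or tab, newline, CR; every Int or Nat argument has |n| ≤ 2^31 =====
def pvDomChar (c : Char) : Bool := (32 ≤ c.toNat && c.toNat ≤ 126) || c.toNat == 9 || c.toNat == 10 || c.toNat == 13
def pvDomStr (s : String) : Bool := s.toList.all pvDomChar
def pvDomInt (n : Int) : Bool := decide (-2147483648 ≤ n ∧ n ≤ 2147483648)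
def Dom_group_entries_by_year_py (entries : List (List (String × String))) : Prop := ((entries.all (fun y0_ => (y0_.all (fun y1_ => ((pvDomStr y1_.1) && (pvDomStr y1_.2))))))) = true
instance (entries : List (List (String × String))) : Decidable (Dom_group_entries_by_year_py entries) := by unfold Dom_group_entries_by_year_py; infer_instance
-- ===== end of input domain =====

-- B replaces itertools.groupby + the two-pass year search by one explicit run-accumulating
-- loop and a single-pass year search with a fallback variable (objective: alternative decomposition).

-- ===== PORT A =====
-- e.get(k) or ""  (absent key → ""; "" or "" = "")
def pvGetStr (e : List (String × String)) (k : String) : String :=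
  ((PySem.Dict.mk e).get? k).getD ""

-- A's guard: rd and len(rd) >= 4 and rd[:4].isdigit()
def pvCondA (s : String) : Bool :=
  !(PySem.Str.len s == 0) && decide (4 ≤ PySem.Str.len s)
    && PySem.Str.strIsdigit (PySem.Str.slice s none (some 4))

-- first loop of _year_for_set
def pvLoopRD : List (List (String × String)) → Option String
  | [] => none
  | e :: rest =>
    let rd := pvGetStr e "set_release_date"
    if pvCondA rd then some (PySem.Str.slice rd none (some 4)) else pvLoopRD rest

-- second loop of _year_for_set
def pvLoopFA : List (List (String × String)) → Option String
  | [] => none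
  | e :: rest =>
    let fa := pvGetStr e "fetched_at"
    if pvCondA fa then some (PySem.Str.slice fa none (some 4)) else pvLoopFA rest

def pvYearForSet (g : List (List (String × String))) : String :=
  match pvLoopRD g with
  | some y => y
  | none =>
    match pvLoopFA g with
    | some y => y
    | none => "?"

-- itertools.groupby(entries, key=lambda e: e.get("set_name") or "") as (key, run) pairs
def pvRuns : List (List (String × String)) → List (String × List (List (String × String)))
  | [] => []
  | e :: rest =>
    let k := pvGetStr e "set_name"
    (k, e :: rest.takeWhile (fun e' => pvGetStr e' "set_name" == k)) ::
      pvRuns (rest.dropWhile (fun e' => pvGetStr e' "set_name" == k))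
termination_by l => l.length
decreasing_by
  exact Nat.lt_succ_of_le (List.length_dropWhile_le _ _)

-- result.setdefault(year, {})[set_name] = group
def pvFlushA (d : PySem.Dict String (PySem.Dict String (List (List (String × String)))))
    (k : String) (g : List (List (String × String))) :
    PySem.Dict String (PySem.Dict String (List (List (String × String)))) :=
  let y := pvYearForSet g
  let d1 := d.setdefault y PySem.Dict.empty
  d1.insert y ((d1.getD y PySem.Dict.empty).insert k g)

def group_entries_by_year_py (entries : List (List (String × String))) :
    List (String × List (String × List (List (String × String)))) :=
  ((pvRuns entries).foldl (fun d p => pvFlushA d p.1 p.2) PySem.Dict.empty).items.map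
    (fun p => (p.1, p.2.items))

-- ===== PORT B =====
-- B's guard: len(rd) >= 4 and rd[:4].isdigit()
def pvCondB (s : String) : Bool :=
  decide (4 ≤ PySem.Str.len s) && PySem.Str.strIsdigit (PySem.Str.slice s none (some 4))

-- single pass with a fallback variable
def pvYearOnce : List (List (String × String)) → Option String → String
  | [], fb => fb.getD "?"
  | e :: rest, fb =>
    let rd := pvGetStr e "set_release_date"
    if pvCondB rd then PySem.Str.slice rd none (some 4)
    else
      pvYearOnce rest
        (match fb with
         | some f => some f
         | none =>
           let fa := pvGetStr e "fetched_at"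
           if pvCondB fa then some (PySem.Str.slice fa none (some 4)) else none)

def pvFlushB (d : PySem.Dict String (PySem.Dict String (List (List (String × String)))))
    (k : String) (g : List (List (String × String))) :
    PySem.Dict String (PySem.Dict String (List (List (String × String)))) :=
  let y := pvYearOnce g none
  let d1 := d.setdefault y PySem.Dict.empty
  d1.insert y ((d1.getD y PySem.Dict.empty).insert k g)

-- one step of B's explicit run-accumulating loop
def pvStepB (st : PySem.Dict String (PySem.Dict String (List (List (String × String)))) ×
      Option (String × List (List (String × String)))) (e : List (String × String)) :
    PySem.Dict String (PySem.Dict String (List (List (String × String)))) ×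
      Option (String × List (List (String × String))) :=
  let k := pvGetStr e "set_name"
  match st.2 with
  | some (ck, cur) =>
    if k == ck then (st.1, some (ck, cur ++ [e]))
    else (pvFlushB st.1 ck cur, some (k, [e]))
  | none => (st.1, some (k, [e]))

def pvFinishB (st : PySem.Dict String (PySem.Dict String (List (List (String × String)))) ×
      Option (String × List (List (String × String)))) :
    PySem.Dict String (PySem.Dict String (List (List (String × String)))) :=
  match st.2 with
  | some (ck, cur) => pvFlushB st.1 ck cur
  | none => st.1

def group_entries_by_year_py_alt (entries : List (List (String × String))) :
    List (String × List (String × List (List (String × String)))) :=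
  (pvFinishB (entries.foldl pvStepB (PySem.Dict.empty, none))).items.map
    (fun p => (p.1, p.2.items))

-- ===== PRECONDITION & SPEC =====
def Spec_group_entries_by_year_py (entries : List (List (String × String))) (out : List (String × List (String × List (List (String × String))))) : Prop := out = group_entries_by_year_py_alt entries
instance (entries : List (List (String × String))) (out : List (String × List (String × List (List (String × String))))) : Decidable (Spec_group_entries_by_year_py entries out) := by
  unfold Spec_group_entries_by_year_py
  haveI : DecidableEq (String × List (String × List (List (String × String)))) := instDecidableEqProd
  haveI : DecidableEq (List (String × List (String × List (List (String × String))))) := instDecidableEqList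
  infer_instance

-- ===== CLAIM (what is proved, stated in full; the proofs are below) =====
def Claim_equal_group_entries_by_year_py : Prop := ∀ (entries : List (List (String × String))), Dom_group_entries_by_year_py entries → Spec_group_entries_by_year_py entries (group_entries_by_year_py entries)

-- ===== LEMMAS AND PROOFS =====

theorem pvCond_eq (s : String) : pvCondA s = pvCondB s := by
  unfold pvCondA pvCondB
  by_cases h : s.length = 0
  · simp [PySem.Str.len, h]
  · have h0 : ((s.length : Int) == 0) = false := by
      simp only [beq_eq_false_iff_ne, ne_eq, Int.natCast_eq_zero]
      exact h
    simp [PySem.Str.len, h0]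

theorem pvYearOnce_eq (g : List (List (String × String))) (fb : Option String) :
    pvYearOnce g fb =
      match pvLoopRD g with
      | some y => y
      | none => (fb.orElse (fun _ => pvLoopFA g)).getD "?" := by
  induction g generalizing fb with
  | nil => cases fb <;> simp [pvYearOnce, pvLoopRD, pvLoopFA, Option.orElse]
  | cons e rest ih =>
    by_cases h : pvCondB (pvGetStr e "set_release_date") = true
    · have hA : pvCondA (pvGetStr e "set_release_date") = true := by
        rw [pvCond_eq]; exact h
      simp [pvYearOnce, pvLoopRD, h, hA]
    · have hA : pvCondA (pvGetStr e "set_release_date") = false := by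
        rw [pvCond_eq]; simpa using h
      have hB : pvCondB (pvGetStr e "set_release_date") = false := by simpa using h
      simp only [pvYearOnce, pvLoopRD, pvLoopFA, hA, hB, Bool.false_eq_true, if_false]
      rw [ih]
      cases fb with
      | some f => cases pvLoopRD rest <;> simp [Option.orElse]
      | none =>
        by_cases hfa : pvCondB (pvGetStr e "fetched_at") = true
        · have hfaA : pvCondA (pvGetStr e "fetched_at") = true := by
            rw [pvCond_eq]; exact hfa
          cases pvLoopRD rest <;> simp [Option.orElse, hfa, hfaA]
        · have hfaB : pvCondB (pvGetStr e "fetched_at") = false := by simpa using hfa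
          have hfaA : pvCondA (pvGetStr e "fetched_at") = false := by
            rw [pvCond_eq]; exact hfaB
          cases pvLoopRD rest <;> simp [Option.orElse, hfaB, hfaA]

theorem pvYear_eq (g : List (List (String × String))) :
    pvYearOnce g none = pvYearForSet g := by
  rw [pvYearOnce_eq]
  unfold pvYearForSet
  cases pvLoopRD g <;> [skip; rfl]
  cases pvLoopFA g <;> simp [Option.orElse]

theorem pvFlush_eq : pvFlushB = pvFlushA := by
  funext d k g
  unfold pvFlushA pvFlushB
  rw [pvYear_eq]

theorem pvRuns_nil : pvRuns [] = [] := by rw [pvRuns.eq_def]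

theorem pvRuns_cons (e : List (String × String)) (rest : List (List (String × String))) :
    pvRuns (e :: rest) =
      (pvGetStr e "set_name",
        e :: rest.takeWhile (fun e' => pvGetStr e' "set_name" == pvGetStr e "set_name")) ::
      pvRuns (rest.dropWhile (fun e' => pvGetStr e' "set_name" == pvGetStr e "set_name")) := by
  rw [pvRuns.eq_def]

theorem pvLoop_eq_runs (l : List (List (String × String)))
    (d : PySem.Dict String (PySem.Dict String (List (List (String × String)))))
    (k : String) (cur : List (List (String × String))) :
    pvFinishB (l.foldl pvStepB (d, some (k, cur))) =
      List.foldl (fun d p => pvFlushA d p.1 p.2) d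
        ((k, cur ++ l.takeWhile (fun e' => pvGetStr e' "set_name" == k)) ::
          pvRuns (l.dropWhile (fun e' => pvGetStr e' "set_name" == k))) := by
  induction l generalizing d k cur with
  | nil => simp [pvFinishB, pvFlush_eq, pvRuns_nil]
  | cons e rest ih =>
    by_cases h : (pvGetStr e "set_name" == k) = true
    · simp only [List.foldl_cons, pvStepB, h, if_true, List.takeWhile_cons, List.dropWhile_cons]
      rw [ih]
      simp
    · have hne : (pvGetStr e "set_name" == k) = false := by
        simpa using h
      simp only [List.foldl_cons, pvStepB, hne, Bool.false_eq_true, if_false,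
        List.takeWhile_cons, List.dropWhile_cons]
      rw [ih, pvFlush_eq]
      simp only [List.foldl_cons, List.append_nil]
      rw [pvRuns_cons]
      simp

theorem pvBuild_eq (entries : List (List (String × String))) :
    pvFinishB (entries.foldl pvStepB (PySem.Dict.empty, none)) =
      (pvRuns entries).foldl (fun d p => pvFlushA d p.1 p.2) PySem.Dict.empty := by
  cases entries with
  | nil => simp [pvFinishB, pvRuns_nil]
  | cons e rest =>
    simp only [List.foldl_cons, pvStepB]
    rw [pvLoop_eq_runs, pvRuns_cons]
    simp

-- ===== VERDICT (by name: the statement is the Claim_ definition above) =====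
theorem group_entries_by_year_py_spec : Claim_equal_group_entries_by_year_py := by
  intro entries _
  unfold Spec_group_entries_by_year_py group_entries_by_year_py group_entries_by_year_py_alt
  rw [pvBuild_eq]
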